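-- pv_equiv track=rewrite | github.com/Natan-Gabriel/FLCD | Scanner/main.py | getReservedWord
-- ===== SOURCE A (Python) =====
-- reservedWords = ["char", "int", "string", "boolean", "array", "for",
--                          "while", "if", "else", "elif", "of", "program", "read",
--                          "print"]
--
-- separators = ["(", ")", "[", "]", "{", "}", ";", " "]
--
-- def getReservedWord(line,index):
--     word=""
--     while len(line)>index and (line[index] not in separators):
--         word+=line[index]
--         index+=1
--         if word in reservedWords:
--             return word, line, index
--     return word,line,index
-- ===== SOURCE B (Python) =====
-- reservedWords = ["char", "int", "string", "boolean", "array", "for",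
--                          "while", "if", "else", "elif", "of", "program", "read",
--                          "print"]
--
-- separators = ["(", ")", "[", "]", "{", "}", ";", " "]
--
-- def getReservedWord(line, index):
--     # Phase 1: scan the whole token up to the first separator / end of line.
--     end = index
--     token = ""
--     while len(line) > end and line[end] not in separators:
--         token += line[end]
--         end += 1
--     # Phase 2: return the shortest reserved prefix of the token, if any.
--     for i in range(1, len(token) + 1):
--         if token[:i] in reservedWords:
--             return token[:i], line, index + i
--     return token, line, end
-- ===== Notes on version B (the rewrite author's own statement) =====
-- stated objective: alternative
-- what changed: A fuses scanning and recognition in one loop that re-tests the growing word after every appended character; B first extracts the full token up to the first separator in one scan, then separately returns the shortest reserved prefix of that token.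
import Mathlib
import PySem

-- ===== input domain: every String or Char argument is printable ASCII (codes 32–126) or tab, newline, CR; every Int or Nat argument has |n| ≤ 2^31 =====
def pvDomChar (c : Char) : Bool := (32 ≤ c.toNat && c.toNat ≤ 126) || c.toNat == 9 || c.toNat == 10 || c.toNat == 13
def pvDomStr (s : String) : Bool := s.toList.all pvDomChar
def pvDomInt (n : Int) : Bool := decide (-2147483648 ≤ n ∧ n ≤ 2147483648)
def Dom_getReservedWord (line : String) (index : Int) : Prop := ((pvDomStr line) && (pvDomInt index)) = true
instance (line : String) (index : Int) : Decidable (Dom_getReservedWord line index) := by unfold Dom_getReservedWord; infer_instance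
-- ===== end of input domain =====

-- B replaces A's fused scan-and-check loop by extract-token-then-shortest-reserved-prefix (objective: alternative decomposition, same cost).

-- ===== PORT A =====
def pvReservedWords : List (List Char) :=
  ["char".toList, "int".toList, "string".toList, "boolean".toList, "array".toList,
   "for".toList, "while".toList, "if".toList, "else".toList, "elif".toList,
   "of".toList, "program".toList, "read".toList, "print".toList]

-- Python's separators are one-character strings; 'line[index] not in separators' is exactly char membership here.
def pvSeparators : List Char := ['(', ')', '[', ']', '{', '}', ';', ' ']

-- A's while loop: state (word, index); early return when the grown word is reserved.
def gwLoopA (line : List Char) (word : List Char) (index : Int) : List Char × Int :=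
  if _h : index < (line.length : Int) then
    match PySem.List.pyGet? line index with
    | none => (word, index)      -- Python raises IndexError here; excluded by Pre_
    | some c =>
      if c ∈ pvSeparators then (word, index)
      else if (word ++ [c]) ∈ pvReservedWords then (word ++ [c], index + 1)
      else gwLoopA line (word ++ [c]) (index + 1)
  else (word, index)
termination_by ((line.length : Int) - index).toNat
decreasing_by omega

def getReservedWord (line : String) (index : Int) : String × String × Int :=
  let r := gwLoopA line.toList [] index
  (String.ofList r.1, line, r.2)

-- ===== PORT B =====
-- B phase 1: scan the whole token up to the first separator / end of line.
def gwScanB (line : List Char) (token : List Char) (e : Int) : List Char × Int :=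
  if _h : e < (line.length : Int) then
    match PySem.List.pyGet? line e with
    | none => (token, e)         -- Python raises IndexError here; excluded by Pre_
    | some c =>
      if c ∈ pvSeparators then (token, e)
      else gwScanB line (token ++ [c]) (e + 1)
  else (token, e)
termination_by ((line.length : Int) - e).toNat
decreasing_by omega

-- B phase 2: for i in range(1, len(token)+1): first reserved prefix token[:i] wins.
def gwPrefB (token : List Char) (index : Int) (e : Int) : List Int → List Char × Int
  | [] => (token, e)
  | i :: rest =>
    let p := PySem.List.slice token (some 0) (some i)
    if p ∈ pvReservedWords then (p, index + i) else gwPrefB token index e rest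

def getReservedWord_alt (line : String) (index : Int) : String × String × Int :=
  let s := gwScanB line.toList [] index
  let r := gwPrefB s.1 index s.2 (PySem.List.pyRange 1 ((s.1.length : Int) + 1) 1)
  (String.ofList r.1, line, r.2)

-- ===== PRECONDITION & SPEC =====
-- Pre_ excludes exactly index < -len(line), where Python A raises IndexError on line[index].
def Pre_getReservedWord (line : String) (index : Int) : Prop :=
  -(line.toList.length : Int) ≤ index
instance (line : String) (index : Int) : Decidable (Pre_getReservedWord line index) := by
  unfold Pre_getReservedWord; infer_instance
def pvWitness_getReservedWord : String × Int := ("int x;", 0)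

def Spec_getReservedWord (line : String) (index : Int) (out : String × String × Int) : Prop := out = getReservedWord_alt line index
instance (line : String) (index : Int) (out : String × String × Int) : Decidable (Spec_getReservedWord line index out) := by unfold Spec_getReservedWord; infer_instance

-- ===== CLAIM (what is proved, stated in full; the proofs are below) =====
def Claim_equal_getReservedWord : Prop := ∀ (line : String) (index : Int), Dom_getReservedWord line index → Pre_getReservedWord line index → Spec_getReservedWord line index (getReservedWord line index)

-- ===== LEMMAS AND PROOFS =====

-- The scan only appends: its token extends the accumulator.
lemma gwScanB_extend (line : List Char) :
    ∀ (n : Nat) (token : List Char) (e : Int),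
      ((line.length : Int) - e).toNat ≤ n →
      ∃ t, (gwScanB line token e).1 = token ++ t := by
  intro n
  induction n with
  | zero =>
    intro token e hn
    rw [gwScanB]
    have : ¬ e < (line.length : Int) := by omega
    simp [this]
  | succ n ih =>
    intro token e hn
    rw [gwScanB]
    by_cases h : e < (line.length : Int)
    · simp only [h, dif_pos]
      cases hc : PySem.List.pyGet? line e with
      | none => exact ⟨[], by simp⟩
      | some c =>
        by_cases hs : c ∈ pvSeparators
        · simp [hs]
        · simp only [hs, if_false]
          obtain ⟨t, ht⟩ := ih (token ++ [c]) (e + 1) (by omega)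
          exact ⟨c :: t, by simpa using ht⟩
    · simp [h]

-- Key invariant: A's fused loop from state (word, index) equals B's scan followed by
-- the prefix search over lengths word.length+1 .. token.length with virtual start index - word.length.
lemma gwKey (line : List Char) :
    ∀ (n : Nat) (word : List Char) (index : Int),
      ((line.length : Int) - index).toNat ≤ n →
      -(line.length : Int) ≤ index →
      gwLoopA line word index =
        gwPrefB (gwScanB line word index).1 (index - word.length) (gwScanB line word index).2
          (PySem.List.pyRange ((word.length : Int) + 1) (((gwScanB line word index).1.length : Int) + 1) 1) := by
  intro n
  induction n with
  | zero =>
    intro word index hn hpre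
    have h : ¬ index < (line.length : Int) := by omega
    rw [gwLoopA, gwScanB]
    simp only [h, dif_neg, not_false_iff]
    rw [PySem.List.pyRange_one]
    simp [gwPrefB]
  | succ n ih =>
    intro word index hn hpre
    by_cases h : index < (line.length : Int)
    · have hin : PySem.Raise.InRange line.length index := by
        constructor <;> omega
      obtain ⟨c, hc⟩ : ∃ c, PySem.List.pyGet? line index = some c := by
        cases hg : PySem.List.pyGet? line index with
        | none =>
          exact absurd hin (by simpa [PySem.List.pyGet?_eq_none_iff] using hg)
        | some c => exact ⟨c, rfl⟩
      rw [gwLoopA, gwScanB]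
      simp only [h, dif_pos, hc]
      by_cases hs : c ∈ pvSeparators
      · simp only [hs, if_pos]
        rw [PySem.List.pyRange_one]
        simp [gwPrefB]
      · simp only [hs, if_neg, not_false_iff]
        -- token of the continued scan extends word ++ [c]
        obtain ⟨t, ht⟩ := gwScanB_extend line (((line.length : Int) - (index + 1)).toNat)
          (word ++ [c]) (index + 1) (le_refl _)
        have hlen : word.length + 1 ≤ (gwScanB line (word ++ [c]) (index + 1)).1.length := by
          simp [ht]
        -- first element of the range is word.length + 1
        have hcons : PySem.List.pyRange ((word.length : Int) + 1)
            (((gwScanB line (word ++ [c]) (index + 1)).1.length : Int) + 1) 1 =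
            ((word.length : Int) + 1) ::
              PySem.List.pyRange ((word.length : Int) + 1 + 1)
                (((gwScanB line (word ++ [c]) (index + 1)).1.length : Int) + 1) 1 := by
          apply PySem.List.pyRange_one_cons
          push_cast
          omega
        have hslice : PySem.List.slice (gwScanB line (word ++ [c]) (index + 1)).1
            (some 0) (some ((word.length : Int) + 1)) = word ++ [c] := by
          rw [PySem.List.slice_toNat _ (by omega) (by omega), ht]
          simp only [Int.toNat_zero, List.drop_zero, Nat.sub_zero]
          have h3 : ((word.length : Int) + 1).toNat = (word ++ [c]).length := by
            simp
          rw [h3, List.take_left]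
        by_cases hr : (word ++ [c]) ∈ pvReservedWords
        · simp only [hr, if_pos]
          rw [hcons, gwPrefB]
          simp only [hslice, hr, if_pos]
          simp only [Prod.mk.injEq]
          exact ⟨trivial, by omega⟩
        · simp only [hr, if_neg, not_false_iff]
          rw [ih (word ++ [c]) (index + 1) (by omega) (by omega)]
          rw [hcons, gwPrefB]
          simp only [hslice, hr, if_neg, not_false_iff]
          have harg : index + 1 - ((word ++ [c]).length : Int) = index - word.length := by
            simp only [List.length_append, List.length_singleton]
            push_cast
            omega
          rw [harg]
          have hstep : (word.length : Int) + 1 + 1 = (((word ++ [c]).length : Int) + 1) := by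
            simp
          rw [hstep]
    · have h' : ¬ index < (line.length : Int) := h
      rw [gwLoopA, gwScanB]
      simp only [h', dif_neg, not_false_iff]
      rw [PySem.List.pyRange_one]
      simp [gwPrefB]

-- ===== VERDICT (by name: the statement is the Claim_ definition above) =====
theorem getReservedWord_spec : Claim_equal_getReservedWord := by
  intro line index _hdom hpre
  unfold Spec_getReservedWord getReservedWord getReservedWord_alt
  have := gwKey line.toList (((line.toList.length : Int) - index).toNat) [] index (le_refl _) hpre
  simp only [List.length_nil, Nat.cast_zero, zero_add, Int.sub_zero] at this
  rw [this]
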